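-- pv_equiv track=rewrite | github.com/richardjharris/adventofcode-2019 | q04.py | matches_criteria
-- ===== SOURCE A (Python) =====
-- def matches_criteria(number: int) -> int:
--     """
--     given a six digit number, returns true if it matches the criteria:
--      - two adjacent digits are the same
--      - going from left to right, the digits never decrease
--     """
--     twoAdjacent = False
--     prevDigit = None
--     for digit in str(number):
--         if prevDigit is None:
--             pass
--         else:
--             if int(prevDigit) > int(digit):
--                 return False
--             elif int(prevDigit) == int(digit):
--                 twoAdjacent = True
--         prevDigit = digit
--
--     if not twoAdjacent:
--         return False
--
--     return True
-- ===== SOURCE B (Python) =====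
-- def matches_criteria(number: int) -> int:
--     digits = [int(c) for c in str(number)]
--     if sorted(digits) != digits:
--         return False
--     return len(set(digits)) < len(digits)
-- ===== Notes on version B (the rewrite author's own statement) =====
-- stated objective: simpler
-- what changed: A's single stateful left-to-right scan with prevDigit/twoAdjacent bookkeeping is replaced by a declarative two-check version: digits are non-decreasing iff sorted(digits) == digits, and a sorted list has an equal adjacent pair iff it has any duplicate, i.e. len(set(digits)) < len(digits).
import Mathlib
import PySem

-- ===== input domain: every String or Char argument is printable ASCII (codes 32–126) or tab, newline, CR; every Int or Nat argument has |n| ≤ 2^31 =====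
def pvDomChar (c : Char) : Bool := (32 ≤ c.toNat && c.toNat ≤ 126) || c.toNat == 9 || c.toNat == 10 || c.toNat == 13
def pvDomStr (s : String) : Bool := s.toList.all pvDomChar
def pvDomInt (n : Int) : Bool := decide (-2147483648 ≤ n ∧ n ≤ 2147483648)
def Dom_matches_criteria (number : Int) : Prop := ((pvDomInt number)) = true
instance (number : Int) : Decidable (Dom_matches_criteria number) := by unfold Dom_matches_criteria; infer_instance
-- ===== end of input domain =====

-- B replaces A's stateful left-to-right scan by a sort-based monotonicity check plus a
-- set-based duplicate check (objective: simpler).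

-- ===== PORT A =====
-- int(c) for a single ASCII digit character (exact on Pre_: str(number) of a
-- nonnegative int consists of digits only)
def digInt (c : Char) : Int := (c.toNat : Int) - 48

-- A's loop: state = (prevDigit, twoAdjacent); early `return False` = result false
def matchesLoop : List Char → Option Char → Bool → Bool
  | [], _, two => two
  | d :: rest, none, two => matchesLoop rest (some d) two
  | d :: rest, some p, two =>
    if digInt p > digInt d then false
    else matchesLoop rest (some d) (two || (digInt p == digInt d))

def matches_criteria (number : Int) : Bool :=
  matchesLoop (PySem.Int.toChars number) none false

-- ===== PORT B =====
def matches_criteria_alt (number : Int) : Bool :=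
  let digits := (PySem.Int.toChars number).map digInt
  if PySem.List.sorted digits (fun x => x) false ≠ digits then false
  else decide ((PySem.Set.ofList digits).length < digits.length)

-- ===== PRECONDITION & SPEC =====
-- Pre_ excludes negative numbers: there str(number) starts with '-' and both A and B
-- raise ValueError at int('-').
def Pre_matches_criteria (number : Int) : Prop := 0 ≤ number
instance (number : Int) : Decidable (Pre_matches_criteria number) := by
  unfold Pre_matches_criteria; infer_instance

def pvWitness_matches_criteria : Int := 112233

def Spec_matches_criteria (number : Int) (out : Bool) : Prop := out = matches_criteria_alt number
instance (number : Int) (out : Bool) : Decidable (Spec_matches_criteria number out) := by unfold Spec_matches_criteria; infer_instance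

-- ===== CLAIM (what is proved, stated in full; the proofs are below) =====
def Claim_equal_matches_criteria : Prop := ∀ (number : Int), Dom_matches_criteria number → Pre_matches_criteria number → Spec_matches_criteria number (matches_criteria number)

-- ===== LEMMAS AND PROOFS =====

-- A's scan, characterised: with pending previous digit p it returns true iff the whole
-- remaining digit sequence is non-decreasing and (two was already set or some adjacent
-- pair is equal, i.e. the sequence is not strictly increasing).
theorem matchesLoop_some (l : List Char) (p : Char) (two : Bool) :
    matchesLoop l (some p) two =
      (decide (List.IsChain (· ≤ ·) (digInt p :: l.map digInt)) &&
       (two || !decide (List.IsChain (· < ·) (digInt p :: l.map digInt)))) := by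
  induction l generalizing p two with
  | nil => simp [matchesLoop]
  | cons d rest ih =>
    by_cases h : digInt p > digInt d
    · simp [matchesLoop, h, List.isChain_cons_cons, not_le.mpr h]
    · have hle : digInt p ≤ digInt d := not_lt.mp h
      simp only [matchesLoop, h, ih, List.map_cons,
        List.isChain_cons_cons]
      by_cases heq : digInt p = digInt d
      · simp [heq]
      · have hlt : digInt p < digInt d := lt_of_le_of_ne hle heq
        have hbe : (digInt p == digInt d) = false := by simp [heq]
        simp [hle, hlt, hbe]

-- set(xs) is smaller than xs exactly when xs has a duplicate
theorem ofList_length_lt_iff (l : List Int) :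
    (PySem.Set.ofList l).length < l.length ↔ ¬ l.Nodup := by
  have hfs : (PySem.Set.ofList l).toFinset = l.toFinset := by
    ext x; simp [PySem.Set.mem_ofList]
  have hlen : (PySem.Set.ofList l).length = l.toFinset.card := by
    rw [← hfs, List.toFinset_card_of_nodup (PySem.Set.nodup_ofList l)]
  rw [hlen]
  constructor
  · intro h hnodup; rw [List.toFinset_card_of_nodup hnodup] at h; omega
  · intro h
    rcases lt_or_eq_of_le (List.toFinset_card_le l) with h' | h'
    · exact h'
    · exfalso
      rw [List.card_toFinset] at h'
      exact h ((List.Sublist.eq_of_length (List.dedup_sublist l) h') ▸ List.nodup_dedup l)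

-- on a non-decreasing list, strictly increasing ↔ no duplicates
theorem chain'_lt_iff_nodup (l : List Int) (hp : List.Pairwise (· ≤ ·) l) :
    List.IsChain (· < ·) l ↔ l.Nodup := by
  rw [List.isChain_iff_pairwise]
  constructor
  · exact fun h => h.imp fun hab => ne_of_lt hab
  · intro h
    exact (hp.and h).imp fun hab => lt_of_le_of_ne hab.1 hab.2

-- ===== VERDICT (by name: the statement is the Claim_ definition above) =====
theorem matches_criteria_spec : Claim_equal_matches_criteria := by
  intro number _ _
  unfold Spec_matches_criteria matches_criteria matches_criteria_alt
  cases h : PySem.Int.toChars number with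
  | nil => decide
  | cons c rest =>
    rw [matchesLoop, matchesLoop_some]
    simp only [List.map_cons, Bool.false_or]
    obtain ⟨digits, hd⟩ : ∃ ds : List Int, digInt c :: rest.map digInt = ds := ⟨_, rfl⟩
    simp only [hd]
    by_cases hs : List.Pairwise (· ≤ ·) digits
    · rw [if_neg (by simp [PySem.List.sorted_eq_self_of_pairwise digits (fun x => x) hs])]
      have hc : List.IsChain (· ≤ ·) digits := List.isChain_iff_pairwise.mpr hs
      rw [decide_eq_true hc, Bool.true_and,
        decide_eq_decide.mpr (chain'_lt_iff_nodup digits hs),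
        decide_eq_decide.mpr (ofList_length_lt_iff digits), decide_not]
    · rw [if_pos (by
        simp only [ne_eq]
        intro he
        exact hs (he ▸ PySem.List.sorted_pairwise digits (fun x => x)))]
      have hc : ¬ List.IsChain (· ≤ ·) digits := fun hc => hs (List.isChain_iff_pairwise.mp hc)
      rw [decide_eq_false hc, Bool.false_and]
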